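-- pv_equiv track=rewrite | github.com/tagore8661/accenture-coding-practice | Problem-06.py | diff_count
-- ===== SOURCE A (Python) =====
-- def diff_count(m,n):
--     sum_div =0
--     sum_not_div =0
--     for i in range(1,m+1):
--         if i % n == 0 :
--             sum_div += i
--
--         else :
--             sum_not_div += i
--     return sum_not_div-sum_div
-- ===== SOURCE B (Python) =====
-- def diff_count(m, n):
--     # closed form: (1+...+m) - 2*(sum of multiples of |n| up to m)
--     if m < 1:
--         return 0
--     total = m * (m + 1) // 2
--     d = abs(n)
--     k = m // d
--     return total - 2 * (d * k * (k + 1) // 2)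
-- ===== Notes on version B (the rewrite author's own statement) =====
-- stated objective: faster
-- what changed: replaced the O(m) loop over 1..m by closed-form arithmetic-series formulas (triangular number minus twice the sum of multiples of |n|)
import Mathlib
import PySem

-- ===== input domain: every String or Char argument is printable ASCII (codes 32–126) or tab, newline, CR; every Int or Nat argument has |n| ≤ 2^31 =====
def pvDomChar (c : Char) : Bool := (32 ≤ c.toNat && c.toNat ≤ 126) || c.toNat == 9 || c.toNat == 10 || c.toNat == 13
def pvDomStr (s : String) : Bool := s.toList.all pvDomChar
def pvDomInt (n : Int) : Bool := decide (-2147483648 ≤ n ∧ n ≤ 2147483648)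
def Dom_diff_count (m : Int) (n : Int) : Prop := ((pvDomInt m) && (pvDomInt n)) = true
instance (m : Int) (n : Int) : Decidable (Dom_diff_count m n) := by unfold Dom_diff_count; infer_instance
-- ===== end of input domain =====

-- B replaces A's O(m) loop by closed-form arithmetic-series formulas (asymptotically faster).


-- ===== PORT A =====
-- loop over range(1, m+1) accumulating (sum_div, sum_not_div)
def diff_count (m : Int) (n : Int) : Int :=
  let p := (PySem.List.pyRange 1 (m + 1) 1).foldl
    (fun (st : Int × Int) i =>
      if PySem.Int.mod i n = 0 then (st.1 + i, st.2) else (st.1, st.2 + i))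
    (0, 0)
  p.2 - p.1

-- ===== PORT B =====
def diff_count_alt (m : Int) (n : Int) : Int :=
  if m < 1 then 0
  else
    let total := PySem.Int.floordiv (m * (m + 1)) 2
    let d := |n|
    let k := PySem.Int.floordiv m d
    total - 2 * PySem.Int.floordiv (d * k * (k + 1)) 2

-- ===== PRECONDITION & SPEC =====
-- Pre_ excludes exactly the inputs on which Python A raises ZeroDivisionError:
-- n = 0 with a non-empty range (m ≥ 1); for m < 1 the loop body never runs.
def Pre_diff_count (m : Int) (n : Int) : Prop := n ≠ 0 ∨ m < 1
instance (m : Int) (n : Int) : Decidable (Pre_diff_count m n) := by unfold Pre_diff_count; infer_instance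
def pvWitness_diff_count : Int × Int := (10, 3)

def Spec_diff_count (m : Int) (n : Int) (out : Int) : Prop := out = diff_count_alt m n
instance (m : Int) (n : Int) (out : Int) : Decidable (Spec_diff_count m n out) := by unfold Spec_diff_count; infer_instance

-- ===== CLAIM (what is proved, stated in full; the proofs are below) =====
def Claim_equal_diff_count : Prop := ∀ (m : Int) (n : Int), Dom_diff_count m n → Pre_diff_count m n → Spec_diff_count m n (diff_count m n)

-- ===== LEMMAS AND PROOFS =====

theorem ediv_succ_of_dvd (d M : Int) (hd : 0 < d) (hdvd : d ∣ (M+1)) :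
    (M+1)/d = M/d + 1 := by
  obtain ⟨c, hc⟩ := hdvd
  have h1 : (M+1)/d = c := by rw [hc]; exact Int.mul_ediv_cancel_left c (by omega)
  have hM : M = (d-1) + d*(c-1) := by
    have h : d*(c-1) = d*c - d := by ring
    omega
  have h2 : M/d = (d-1)/d + (c-1) := by rw [hM]; exact Int.add_mul_ediv_left _ _ (by omega)
  have h3 : (d-1)/d = 0 := Int.ediv_eq_zero_of_lt (by omega) (by omega)
  omega

theorem ediv_succ_of_not_dvd (d M : Int) (hd : 0 < d) (hdvd : ¬ d ∣ (M+1)) :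
    (M+1)/d = M/d := by
  have hr0 : 0 ≤ (M+1) % d := Int.emod_nonneg _ (by omega)
  have hrd : (M+1) % d < d := Int.emod_lt_of_pos _ hd
  have hrne : (M+1) % d ≠ 0 := fun h => hdvd (Int.dvd_of_emod_eq_zero h)
  have heq : M+1 = d * ((M+1)/d) + (M+1) % d := by have := Int.emod_add_mul_ediv (M+1) d; omega
  have h2 : M = ((M+1)%d - 1) + d*((M+1)/d) := by omega
  have h3 : M/d = ((M+1)%d - 1)/d + ((M+1)/d) := by
    conv_lhs => rw [h2]
    exact Int.add_mul_ediv_left _ _ (by omega : d ≠ 0)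
  have h4 : ((M+1)%d - 1)/d = 0 := Int.ediv_eq_zero_of_lt (by omega) (by omega)
  omega

theorem fold_closed (n : Int) (hn : n ≠ 0) (mN : Nat) :
    2 * ((PySem.List.pyRange 1 ((mN : Int) + 1) 1).foldl
      (fun (st : Int × Int) i =>
        if PySem.Int.mod i n = 0 then (st.1 + i, st.2) else (st.1, st.2 + i))
      (0, 0)).1 = |n| * ((mN : Int) / |n|) * ((mN : Int) / |n| + 1) ∧
    2 * (((PySem.List.pyRange 1 ((mN : Int) + 1) 1).foldl
      (fun (st : Int × Int) i =>
        if PySem.Int.mod i n = 0 then (st.1 + i, st.2) else (st.1, st.2 + i))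
      (0, 0)).1 +
      ((PySem.List.pyRange 1 ((mN : Int) + 1) 1).foldl
      (fun (st : Int × Int) i =>
        if PySem.Int.mod i n = 0 then (st.1 + i, st.2) else (st.1, st.2 + i))
      (0, 0)).2) = (mN : Int) * ((mN : Int) + 1) := by
  have hd : 0 < |n| := abs_pos.mpr hn
  induction mN with
  | zero =>
    rw [PySem.List.pyRange_one_eq_nil (by norm_num)]
    simp
  | succ M ih =>
    have hcast : ((M + 1 : Nat) : Int) = (M : Int) + 1 := by push_cast; ring
    rw [hcast, PySem.List.pyRange_one_succ_right (by omega), List.foldl_append]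
    set p := (PySem.List.pyRange 1 ((M : Int) + 1) 1).foldl
      (fun (st : Int × Int) i =>
        if PySem.Int.mod i n = 0 then (st.1 + i, st.2) else (st.1, st.2 + i))
      (0, 0) with hp
    simp only [List.foldl_cons, List.foldl_nil]
    by_cases hdvd : |n| ∣ ((M : Int) + 1)
    · have hmod : PySem.Int.mod ((M : Int) + 1) n = 0 :=
        (PySem.Int.mod_eq_zero_iff_dvd _ _).mpr ((abs_dvd n _).mp hdvd)
      rw [if_pos hmod]
      have hq : ((M : Int) + 1) / |n| = (M : Int) / |n| + 1 := ediv_succ_of_dvd _ _ hd hdvd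
      obtain ⟨c, hc⟩ := hdvd
      have hc' : (M : Int) + 1 = |n| * ((M : Int) / |n| + 1) := by
        rw [← hq, hc, Int.mul_ediv_cancel_left c (by omega)]
      constructor
      · simp only [hq]
        have := ih.1
        nlinarith [this, hc']
      · have := ih.2
        nlinarith [this]
    · have hmod : PySem.Int.mod ((M : Int) + 1) n ≠ 0 := fun h =>
        hdvd ((abs_dvd n _).mpr ((PySem.Int.mod_eq_zero_iff_dvd _ _).mp h))
      rw [if_neg hmod]
      have hq : ((M : Int) + 1) / |n| = (M : Int) / |n| :=
        ediv_succ_of_not_dvd _ _ hd hdvd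
      constructor
      · simp only [hq]; exact ih.1
      · have := ih.2
        nlinarith [this]

-- ===== VERDICT (by name: the statement is the Claim_ definition above) =====
theorem diff_count_spec : Claim_equal_diff_count := by
  intro m n _ hn
  unfold Spec_diff_count diff_count diff_count_alt
  by_cases hm : m < 1
  · rw [if_pos hm, PySem.List.pyRange_one_eq_nil (by omega)]
    simp
  · rw [if_neg hm]
    have hn' : n ≠ 0 := hn.resolve_right hm
    obtain ⟨mN, rfl⟩ := Int.eq_ofNat_of_zero_le (by omega : (0:Int) ≤ m)
    have hd : 0 < |n| := abs_pos.mpr hn'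
    obtain ⟨h1, h2⟩ := fold_closed n hn' mN
    set p := (PySem.List.pyRange 1 ((mN : Int) + 1) 1).foldl
      (fun (st : Int × Int) i =>
        if PySem.Int.mod i n = 0 then (st.1 + i, st.2) else (st.1, st.2 + i))
      (0, 0) with hp
    have hfd : PySem.Int.floordiv (mN : Int) |n| = (mN : Int) / |n| :=
      PySem.Int.floordiv_eq_ediv_of_pos hd
    have ht : PySem.Int.floordiv ((mN : Int) * ((mN : Int) + 1)) 2 = p.1 + p.2 := by
      rw [PySem.Int.floordiv_eq_ediv_of_pos (by norm_num), ← h2,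
        Int.mul_ediv_cancel_left _ (by norm_num)]
    have hs : PySem.Int.floordiv (|n| * ((mN : Int) / |n|) * ((mN : Int) / |n| + 1)) 2 = p.1 := by
      rw [PySem.Int.floordiv_eq_ediv_of_pos (by norm_num), ← h1,
        Int.mul_ediv_cancel_left _ (by norm_num)]
    simp only [hfd, ht, hs]
    ring
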